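-- pv_equiv track=rewrite | github.com/fu-group/fu | src/lib.py | FindGrpNmb
-- ===== SOURCE A (Python) =====
-- def FindGrpNmb(ia,grplst):
--     # find group number of atom ia
--     ig=-1
--     if len(grplst) <= 0: return ig
--     for i in range(len(grplst)):
--         for j in grplst[i]:
--             if j == ia:
--                 ig=i; break
--     return ig
-- ===== SOURCE B (Python) =====
-- def FindGrpNmb(ia, grplst):
--     # find group number of atom ia: scan groups from the last one backwards,
--     # returning the first (i.e. highest) index whose group contains ia
--     for i in range(len(grplst) - 1, -1, -1):
--         if ia in grplst[i]:
--             return i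
--     return -1
-- ===== Notes on version B (the rewrite author's own statement) =====
-- stated objective: simpler
-- what changed: A keeps an accumulator and scans every group front-to-back (never breaking the outer loop); B iterates group indices in reverse and returns immediately at the first group containing ia, with no accumulator and no explicit empty-list guard.
import Mathlib
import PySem

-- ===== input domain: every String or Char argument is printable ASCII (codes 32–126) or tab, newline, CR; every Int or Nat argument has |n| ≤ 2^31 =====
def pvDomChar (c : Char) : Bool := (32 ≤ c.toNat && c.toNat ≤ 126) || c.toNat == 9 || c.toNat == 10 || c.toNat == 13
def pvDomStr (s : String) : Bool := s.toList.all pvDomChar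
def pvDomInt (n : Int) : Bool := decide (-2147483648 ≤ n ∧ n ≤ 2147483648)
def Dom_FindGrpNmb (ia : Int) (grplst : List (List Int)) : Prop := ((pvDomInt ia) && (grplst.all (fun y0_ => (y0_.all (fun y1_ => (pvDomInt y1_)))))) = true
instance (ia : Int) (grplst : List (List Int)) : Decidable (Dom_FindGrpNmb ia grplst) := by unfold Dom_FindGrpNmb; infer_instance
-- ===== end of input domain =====

-- B replaces A's accumulator-and-full-scan with a reverse-index early-return search (simpler; same last-matching-group result).


-- ===== PORT A =====
-- inner loop of A: scan group g, break (returning i) at the first atom equal to ia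
def innerA (ia : Int) (i : Int) (ig : Int) : List Int → Int
  | [] => ig
  | j :: rest => if j == ia then i else innerA ia i ig rest

def FindGrpNmb (ia : Int) (grplst : List (List Int)) : Int :=
  let ig : Int := -1
  if grplst.length ≤ 0 then ig
  else
    (PySem.List.pyRange 0 grplst.length 1).foldl
      (fun ig i => innerA ia i ig (PySem.List.pyGetD grplst i [])) ig

-- ===== PORT B =====
-- B's reverse loop: k is i+1, counting the index i = k-1 down to 0; early return on membership
def altGo (ia : Int) (grplst : List (List Int)) : Nat → Int
  | 0 => -1
  | k + 1 => if ia ∈ grplst.getD k [] then (k : Int) else altGo ia grplst k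

def FindGrpNmb_alt (ia : Int) (grplst : List (List Int)) : Int :=
  altGo ia grplst grplst.length

-- ===== PRECONDITION & SPEC =====
def Spec_FindGrpNmb (ia : Int) (grplst : List (List Int)) (out : Int) : Prop := out = FindGrpNmb_alt ia grplst
instance (ia : Int) (grplst : List (List Int)) (out : Int) : Decidable (Spec_FindGrpNmb ia grplst out) := by unfold Spec_FindGrpNmb; infer_instance

-- ===== CLAIM (what is proved, stated in full; the proofs are below) =====
def Claim_equal_FindGrpNmb : Prop := ∀ (ia : Int) (grplst : List (List Int)), Dom_FindGrpNmb ia grplst → Spec_FindGrpNmb ia grplst (FindGrpNmb ia grplst)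

-- ===== LEMMAS AND PROOFS =====

-- ===== VERDICT (by name: the statement is the Claim_ definition above) =====
theorem innerA_eq (ia i ig : Int) (g : List Int) :
    innerA ia i ig g = if ia ∈ g then i else ig := by
  induction g with
  | nil => simp [innerA]
  | cons j rest ih =>
    simp only [innerA, List.mem_cons, beq_iff_eq, ih]
    by_cases h : j = ia
    · simp [h]
    · have h' : ¬ ia = j := fun hh => h hh.symm
      simp [h, h']

theorem foldA_eq_altGo (ia : Int) (grplst : List (List Int)) (n : Nat) (hn : n ≤ grplst.length) :
    (PySem.List.pyRange 0 (n : Int) 1).foldl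
      (fun ig i => innerA ia i ig (PySem.List.pyGetD grplst i [])) (-1)
    = altGo ia grplst n := by
  induction n with
  | zero => simp [altGo]
  | succ k ih =>
    have hk : k ≤ grplst.length := Nat.le_of_succ_le hn
    rw [show ((k + 1 : Nat) : Int) = (k : Int) + 1 by push_cast; ring,
        PySem.List.pyRange_one_succ_right (by positivity), List.foldl_append, ih hk]
    simp [innerA_eq, altGo]

theorem FindGrpNmb_spec : Claim_equal_FindGrpNmb := by
  intro ia grplst _
  unfold Spec_FindGrpNmb FindGrpNmb FindGrpNmb_alt
  by_cases h : grplst.length ≤ 0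
  · have : grplst = [] := List.eq_nil_of_length_eq_zero (Nat.le_zero.mp h)
    simp [this, altGo]
  · simp only [h, if_false]
    exact foldA_eq_altGo ia grplst grplst.length le_rfl
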